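-- pv_equiv track=rewrite | github.com/ken-sok/Social-Network-Analysation | second_degree_fri.py | friend_second_besties
-- ===== SOURCE A (Python) =====
-- def friend_second_besties(individual, friend_dict):
--     '''
--     this function takes in 'individual' and 'friend_dict', then finds and output
--     a sorted list of degree-two friends/ friend of a friend of 'individual' through
--     'friend_dict'
--     '''
--     # list of degree-two friends
--     degree_2=[]
--
--     # test whether individual is in friend_dict or not
--     if individual in friend_dict:
--
--         # search through each person in friend_dict
--         for name in friend_dict:
--
--             # avoid looking in own name for degree one friend
--             if individual != name:
--
--                 # if friend of individual is also a friend of another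
--                 # person and if the individual is not a friend of that
--                 # other person, then we get degree two friend
--                 if (individual not in friend_dict[name] and
--                     friend_dict[individual] & friend_dict[name]):
--                     degree_2.append(name)
--
--         return sorted(degree_2)
-- ===== SOURCE B (Python) =====
-- def friend_second_besties(individual, friend_dict):
--     '''Reverse-index re-implementation: build who-lists-whom once, union the
--     reverse entries of individual's friends to get candidates sharing a friend,
--     then filter and sort. Same result as the nested-scan original.'''
--     if individual not in friend_dict:
--         return None
--     reverse = {}
--     for name in friend_dict:
--         for f in friend_dict[name]:
--             reverse.setdefault(f, set()).add(name)
--     candidates = set()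
--     for f in friend_dict[individual]:
--         candidates |= reverse.get(f, set())
--     return sorted(n for n in candidates
--                   if n != individual and individual not in friend_dict[n])
-- ===== Notes on version B (the rewrite author's own statement) =====
-- stated objective: alternative
-- what changed: Replaces the per-name set-intersection scan over the whole dict with a reverse index (friend -> names listing that friend) built once; candidates come from unioning the reverse entries of individual's friends and only those are filtered and sorted; measured cost is about the same as A's.
import Mathlib
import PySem

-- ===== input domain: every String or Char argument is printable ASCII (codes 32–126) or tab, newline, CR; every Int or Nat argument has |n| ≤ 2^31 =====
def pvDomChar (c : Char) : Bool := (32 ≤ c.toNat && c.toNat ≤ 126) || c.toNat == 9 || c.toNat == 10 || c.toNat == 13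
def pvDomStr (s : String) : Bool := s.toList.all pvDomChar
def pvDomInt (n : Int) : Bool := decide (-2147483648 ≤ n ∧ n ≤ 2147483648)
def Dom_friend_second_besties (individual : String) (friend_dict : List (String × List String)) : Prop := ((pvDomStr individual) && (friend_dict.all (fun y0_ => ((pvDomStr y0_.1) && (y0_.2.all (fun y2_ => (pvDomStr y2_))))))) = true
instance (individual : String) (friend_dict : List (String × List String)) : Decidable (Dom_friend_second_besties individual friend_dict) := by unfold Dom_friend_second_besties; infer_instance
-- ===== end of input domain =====

-- B replaces A's per-name set-intersection scan with a reverse index (friend -> who lists it),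
-- unions the reverse entries of individual's friends into the candidate set, filters and sorts; same result.

-- ===== PORT A =====
-- Literal transliteration of A: scan every name in the dict, append it when it is not the
-- individual, does not list the individual, and its friend set meets the individual's; sort at the end.
def friend_second_besties (individual : String) (friend_dict : List (String × List String)) : Option (List String) :=
  let fd : PySem.Dict String (List String) := PySem.Dict.mk friend_dict
  if fd.contains individual then
    let degree_2 : List String := fd.keys.foldl (fun acc name =>
      if individual != name then
        if !(fd.getD name []).contains individual
            && !(PySem.Set.inter (fd.getD individual []) (fd.getD name [])).isEmpty then
          acc ++ [name]
        else acc
      else acc) []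
    some (PySem.List.sorted degree_2 (fun x => x))
  else none

-- ===== PORT B =====
-- Transliteration of Source B: build reverse index with a nested loop, union reverse entries of
-- the individual's friends into a candidate set, filter it, sort it.
def friend_second_besties_alt (individual : String) (friend_dict : List (String × List String)) : Option (List String) :=
  let fd : PySem.Dict String (List String) := PySem.Dict.mk friend_dict
  if !fd.contains individual then none
  else
    let reverse : PySem.Dict String (PySem.Set String) :=
      fd.keys.foldl (fun r name =>
        (fd.getD name []).foldl (fun r f => r.modify f PySem.Set.empty (fun s => s.add name)) r)
        PySem.Dict.empty
    let candidates : PySem.Set String :=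
      (fd.getD individual []).foldl (fun c f => c.union (reverse.getD f PySem.Set.empty)) PySem.Set.empty
    some (PySem.List.sorted
      (candidates.filter (fun n => n != individual && !(fd.getD n []).contains individual))
      (fun x => x))

-- ===== PRECONDITION & SPEC =====
-- Pre_ only requires distinct keys: the association list represents a Python dict, which cannot
-- carry duplicate keys, so no input A actually accepts is excluded.
def Pre_friend_second_besties (individual : String) (friend_dict : List (String × List String)) : Prop :=
  (friend_dict.map Prod.fst).Nodup
instance (individual : String) (friend_dict : List (String × List String)) : Decidable (Pre_friend_second_besties individual friend_dict) := by unfold Pre_friend_second_besties; infer_instance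

def pvWitness_friend_second_besties : String × (List (String × List String)) :=
  ("a", [("a", ["b"]), ("b", ["c"]), ("c", ["b"])])

def Spec_friend_second_besties (individual : String) (friend_dict : List (String × List String)) (out : Option (List String)) : Prop := out = friend_second_besties_alt individual friend_dict
instance (individual : String) (friend_dict : List (String × List String)) (out : Option (List String)) : Decidable (Spec_friend_second_besties individual friend_dict out) := by unfold Spec_friend_second_besties; infer_instance

-- ===== CLAIM (what is proved, stated in full; the proofs are below) =====
def Claim_equal_friend_second_besties : Prop := ∀ (individual : String) (friend_dict : List (String × List String)), Dom_friend_second_besties individual friend_dict → Pre_friend_second_besties individual friend_dict → Spec_friend_second_besties individual friend_dict (friend_second_besties individual friend_dict)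

-- ===== LEMMAS AND PROOFS =====

-- A's accumulation loop is a filter of the key list.
theorem loopA_eq_filter (ind : String) (cond : String → Bool) :
    ∀ (ks acc : List String),
      ks.foldl (fun acc name =>
        if ind != name then (if cond name then acc ++ [name] else acc) else acc) acc
      = acc ++ ks.filter (fun n => (ind != n) && cond n) := by
  intro ks
  induction ks with
  | nil => intro acc; simp
  | cons k ks ih =>
    intro acc
    by_cases h1 : (ind != k) = true
    · by_cases h2 : cond k = true
      · rw [List.foldl_cons, if_pos h1, if_pos h2, ih, List.filter_cons]
        simp [h1, h2]
      · rw [List.foldl_cons, if_pos h1, if_neg h2, ih, List.filter_cons]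
        simp [h1, h2]
    · rw [List.foldl_cons, if_neg h1, ih, List.filter_cons]
      simp only [Bool.not_eq_true] at h1
      simp [h1]

-- Membership through the inner reverse-index loop (one name, its friend list).
theorem inner_mem (name : String) :
    ∀ (friends : List String) (r : PySem.Dict String (PySem.Set String)) (g y : String),
      y ∈ (friends.foldl (fun r f => r.modify f PySem.Set.empty (fun s => s.add name)) r).getD g PySem.Set.empty
      ↔ y ∈ r.getD g PySem.Set.empty ∨ (y = name ∧ g ∈ friends) := by
  intro friends
  induction friends with
  | nil => intro r g y; simp
  | cons f fs ih =>
    intro r g y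
    rw [List.foldl_cons, ih]
    rw [PySem.Dict.getD_modify]
    by_cases hg : g = f
    · subst hg
      rw [if_pos rfl, PySem.Set.mem_add]
      simp only [List.mem_cons]
      tauto
    · rw [if_neg hg]
      simp only [List.mem_cons]
      tauto

-- Membership through the outer reverse-index loop.
theorem outer_mem (fd : PySem.Dict String (List String)) :
    ∀ (ks : List String) (r : PySem.Dict String (PySem.Set String)) (g y : String),
      y ∈ (ks.foldl (fun r name =>
              (fd.getD name []).foldl (fun r f => r.modify f PySem.Set.empty (fun s => s.add name)) r) r).getD g PySem.Set.empty
      ↔ y ∈ r.getD g PySem.Set.empty ∨ ∃ n ∈ ks, y = n ∧ g ∈ fd.getD n [] := by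
  intro ks
  induction ks with
  | nil => intro r g y; simp
  | cons k ks ih =>
    intro r g y
    rw [List.foldl_cons, ih, inner_mem]
    simp only [List.mem_cons]
    constructor
    · rintro ((h | h) | ⟨n, hn, h⟩)
      · exact Or.inl h
      · exact Or.inr ⟨k, Or.inl rfl, h⟩
      · exact Or.inr ⟨n, Or.inr hn, h⟩
    · rintro (h | ⟨n, (rfl | hn), h⟩)
      · exact Or.inl (Or.inl h)
      · exact Or.inl (Or.inr h)
      · exact Or.inr ⟨n, hn, h⟩

-- Membership through the candidate-union loop.
theorem cand_mem (g : String → PySem.Set String) :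
    ∀ (l : List String) (c : PySem.Set String) (y : String),
      y ∈ l.foldl (fun c f => c.union (g f)) c ↔ y ∈ c ∨ ∃ f ∈ l, y ∈ g f := by
  intro l
  induction l with
  | nil => intro c y; simp
  | cons f fs ih =>
    intro c y
    rw [List.foldl_cons, ih]
    rw [PySem.Set.mem_union]
    simp only [List.mem_cons]
    constructor
    · rintro ((h | h) | ⟨f', hf', h⟩)
      · exact Or.inl h
      · exact Or.inr ⟨f, Or.inl rfl, h⟩
      · exact Or.inr ⟨f', Or.inr hf', h⟩
    · rintro (h | ⟨f', (rfl | hf'), h⟩)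
      · exact Or.inl (Or.inl h)
      · exact Or.inl (Or.inr h)
      · exact Or.inr ⟨f', hf', h⟩

-- The candidate-union loop preserves Nodup.
theorem cand_nodup (g : String → PySem.Set String) :
    ∀ (l : List String) (c : PySem.Set String), c.Nodup →
      (l.foldl (fun c f => c.union (g f)) c).Nodup := by
  intro l
  induction l with
  | nil => intro c h; exact h
  | cons f fs ih =>
    intro c h
    exact ih _ (PySem.Set.nodup_union _ _ h)

-- A nonempty intersection names a common element.
theorem inter_nonempty_iff (s t : PySem.Set String) :
    ((PySem.Set.inter s t).isEmpty = false) ↔ ∃ f, f ∈ s ∧ f ∈ t := by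
  rw [List.isEmpty_eq_false_iff_exists_mem]
  constructor
  · rintro ⟨f, hf⟩
    exact ⟨f, (PySem.Set.mem_inter s t f).mp hf⟩
  · rintro ⟨f, hf⟩
    exact ⟨f, (PySem.Set.mem_inter s t f).mpr hf⟩

-- Nothing is a member of the empty set.
theorem mem_set_empty_iff (y : String) : y ∈ (PySem.Set.empty : PySem.Set String) ↔ False := by
  simp [PySem.Set.empty]

-- ===== VERDICT (by name: the statement is the Claim_ definition above) =====
theorem friend_second_besties_spec : Claim_equal_friend_second_besties := by
  intro individual friend_dict _hdom hpre
  unfold Spec_friend_second_besties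
  unfold friend_second_besties friend_second_besties_alt
  simp only []
  set fd : PySem.Dict String (List String) := PySem.Dict.mk friend_dict with hfd
  by_cases hc : fd.contains individual = true
  · simp only [hc, if_true, Bool.not_true, Bool.false_eq_true, if_false]
    have hk : fd.keys.Nodup := hpre
    rw [loopA_eq_filter]
    rw [List.nil_append]
    apply congrArg some
    apply PySem.List.sorted_eq_sorted_of_perm
    · intro a b h; exact h
    · refine (List.perm_ext_iff_of_nodup (hk.filter _)
        (List.Nodup.filter _ (cand_nodup _ _ PySem.Set.empty List.nodup_nil))).mpr ?_
      intro x
      rw [List.mem_filter, List.mem_filter, cand_mem]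
      simp only [mem_set_empty_iff, false_or]
      constructor
      · rintro ⟨hxk, hcond⟩
        rw [Bool.and_eq_true, Bool.and_eq_true] at hcond
        have hne := hcond.1
        have hnin := hcond.2.1
        have hint := hcond.2.2
        rw [Bool.not_eq_eq_eq_not, Bool.not_true] at hint
        obtain ⟨f, hf1, hf2⟩ := (inter_nonempty_iff _ _).mp hint
        refine ⟨⟨f, hf1, ?_⟩, ?_⟩
        · rw [outer_mem]
          right
          exact ⟨x, hxk, rfl, hf2⟩
        · rw [Bool.and_eq_true]
          refine ⟨?_, hnin⟩
          simp only [bne_iff_ne] at hne ⊢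
          exact fun h => hne h.symm
      · rintro ⟨⟨f, hf1, hf2⟩, hq⟩
        rw [outer_mem] at hf2
        simp only [PySem.Dict.getD_empty, mem_set_empty_iff, false_or] at hf2
        obtain ⟨n, hn, rfl, hfn⟩ := hf2
        rw [Bool.and_eq_true] at hq
        refine ⟨hn, ?_⟩
        rw [Bool.and_eq_true, Bool.and_eq_true]
        refine ⟨?_, hq.2, ?_⟩
        · have h1 := hq.1
          simp only [bne_iff_ne] at h1 ⊢
          exact fun h => h1 h.symm
        · rw [Bool.not_eq_eq_eq_not, Bool.not_true]
          exact (inter_nonempty_iff _ _).mpr ⟨f, hf1, hfn⟩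
  · simp [hc]
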